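-- pv_equiv track=rewrite | github.com/chwanlouis/yahoo_finance_algo | common.py | get_stock_sub_indexes
-- ===== SOURCE A (Python) =====
-- def get_stock_sub_indexes(stock: str):
--     sub_index_category = {
--         "Finance": ["0005.HK", "0011.HK", "0388.HK", "0939.HK", "1299.HK", "1398.HK", "2318.HK", "2388.HK", "2628.HK",
--                     "3328.HK", "3988.HK"],
--         "Utilities": ["0002.HK", "0003.HK", "0006.HK", "0836.HK", "1038.HK"],
--         "Properties": ["0012.HK", "0016.HK", "0017.HK", "0083.HK", "0101.HK", "0688.HK", "0823.HK", "1109.HK", "1113.HK",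
--                        "1997.HK", "2007.HK"],
--         "Commerce & Industry": ["0001.HK", "0019.HK", "0027.HK", "0066.HK", "0151.HK", "0175.HK", "0267.HK", "0288.HK",
--                                 "0386.HK", "0700.HK", "0762.HK", "0857.HK", "0883.HK", "0941.HK", "1044.HK", "1088.HK",
--                                 "1093.HK", "1177.HK", "1928.HK", "2018.HK", "2313.HK", "2319.HK", "2382.HK"]
--     }
--     for category, stock_list in sub_index_category.items():
--         if stock in stock_list:
--             return category
--     return None
-- ===== SOURCE B (Python) =====
-- # All tickers in one flat list (same order as the category data); the category is
-- # decided by the position of the ticker via cumulative-boundary arithmetic.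
-- _TICKERS = [
--     "0005.HK", "0011.HK", "0388.HK", "0939.HK", "1299.HK", "1398.HK", "2318.HK", "2388.HK", "2628.HK",
--     "3328.HK", "3988.HK",
--     "0002.HK", "0003.HK", "0006.HK", "0836.HK", "1038.HK",
--     "0012.HK", "0016.HK", "0017.HK", "0083.HK", "0101.HK", "0688.HK", "0823.HK", "1109.HK", "1113.HK",
--     "1997.HK", "2007.HK",
--     "0001.HK", "0019.HK", "0027.HK", "0066.HK", "0151.HK", "0175.HK", "0267.HK", "0288.HK",
--     "0386.HK", "0700.HK", "0762.HK", "0857.HK", "0883.HK", "0941.HK", "1044.HK", "1088.HK",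
--     "1093.HK", "1177.HK", "1928.HK", "2018.HK", "2313.HK", "2319.HK", "2382.HK",
-- ]
--
-- # cumulative end positions of the category segments in _TICKERS
-- _BOUNDARIES = [(11, "Finance"), (16, "Utilities"), (27, "Properties"), (50, "Commerce & Industry")]
--
--
-- def get_stock_sub_indexes(stock: str):
--     try:
--         i = _TICKERS.index(stock)
--     except ValueError:
--         return None
--     for bound, category in _BOUNDARIES:
--         if i < bound:
--             return category
-- ===== Notes on version B (the rewrite author's own statement) =====
-- stated objective: alternative
-- what changed: Instead of looping over categories and testing membership in each category's list, B stores the tickers as one flat positional list, finds the ticker's index once, and maps that index to a category by comparing it against cumulative segment boundaries.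
import Mathlib
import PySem

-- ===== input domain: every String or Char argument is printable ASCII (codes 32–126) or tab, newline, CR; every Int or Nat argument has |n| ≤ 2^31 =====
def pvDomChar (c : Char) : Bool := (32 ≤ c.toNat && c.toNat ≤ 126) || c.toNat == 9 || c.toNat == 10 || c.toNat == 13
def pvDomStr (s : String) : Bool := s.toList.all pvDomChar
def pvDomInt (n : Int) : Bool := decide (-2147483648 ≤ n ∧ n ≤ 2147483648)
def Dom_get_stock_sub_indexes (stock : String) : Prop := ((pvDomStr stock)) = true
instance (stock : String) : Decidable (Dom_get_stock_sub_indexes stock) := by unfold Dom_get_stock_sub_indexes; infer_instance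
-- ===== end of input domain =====

-- B replaces A's per-category membership loop by one flat positional ticker list:
-- find the ticker's index once, then map the index to a category via cumulative
-- segment boundaries (alternative decomposition; same result).

-- ===== PORT A =====
-- the dict literal sub_index_category
def pvSubIndexCategory : PySem.Dict String (List String) := PySem.Dict.ofList
  [ ("Finance", ["0005.HK", "0011.HK", "0388.HK", "0939.HK", "1299.HK", "1398.HK", "2318.HK", "2388.HK", "2628.HK",
                 "3328.HK", "3988.HK"]),
    ("Utilities", ["0002.HK", "0003.HK", "0006.HK", "0836.HK", "1038.HK"]),
    ("Properties", ["0012.HK", "0016.HK", "0017.HK", "0083.HK", "0101.HK", "0688.HK", "0823.HK", "1109.HK", "1113.HK",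
                    "1997.HK", "2007.HK"]),
    ("Commerce & Industry", ["0001.HK", "0019.HK", "0027.HK", "0066.HK", "0151.HK", "0175.HK", "0267.HK", "0288.HK",
                             "0386.HK", "0700.HK", "0762.HK", "0857.HK", "0883.HK", "0941.HK", "1044.HK", "1088.HK",
                             "1093.HK", "1177.HK", "1928.HK", "2018.HK", "2313.HK", "2319.HK", "2382.HK"]) ]

-- the 'for category, stock_list in ….items(): if stock in stock_list: return category' loop
def pvLoopA (stock : String) : List (String × List String) → Option String
  | [] => none
  | (category, stock_list) :: rest =>
      if stock_list.contains stock then some category else pvLoopA stock rest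

def get_stock_sub_indexes (stock : String) : Option String :=
  pvLoopA stock pvSubIndexCategory.items

-- ===== PORT B =====
-- the flat module-level _TICKERS list
def pvTickers : List String :=
  [ "0005.HK", "0011.HK", "0388.HK", "0939.HK", "1299.HK", "1398.HK", "2318.HK", "2388.HK", "2628.HK",
    "3328.HK", "3988.HK",
    "0002.HK", "0003.HK", "0006.HK", "0836.HK", "1038.HK",
    "0012.HK", "0016.HK", "0017.HK", "0083.HK", "0101.HK", "0688.HK", "0823.HK", "1109.HK", "1113.HK",
    "1997.HK", "2007.HK",
    "0001.HK", "0019.HK", "0027.HK", "0066.HK", "0151.HK", "0175.HK", "0267.HK", "0288.HK",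
    "0386.HK", "0700.HK", "0762.HK", "0857.HK", "0883.HK", "0941.HK", "1044.HK", "1088.HK",
    "1093.HK", "1177.HK", "1928.HK", "2018.HK", "2313.HK", "2319.HK", "2382.HK" ]

-- the module-level _BOUNDARIES list
def pvBoundaries : List (Nat × String) :=
  [(11, "Finance"), (16, "Utilities"), (27, "Properties"), (50, "Commerce & Industry")]

-- the 'for bound, category in _BOUNDARIES: if i < bound: return category' loop
def pvFindCat (i : Nat) : List (Nat × String) → Option String
  | [] => none
  | (bound, category) :: rest => if i < bound then some category else pvFindCat i rest

def get_stock_sub_indexes_alt (stock : String) : Option String :=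
  match PySem.List.index? pvTickers stock with
  | none => none
  | some i => pvFindCat i pvBoundaries

-- ===== PRECONDITION & SPEC =====
def Spec_get_stock_sub_indexes (stock : String) (out : Option String) : Prop := out = get_stock_sub_indexes_alt stock
instance (stock : String) (out : Option String) : Decidable (Spec_get_stock_sub_indexes stock out) := by unfold Spec_get_stock_sub_indexes; infer_instance

-- ===== CLAIM =====
def Claim_equal_get_stock_sub_indexes : Prop := ∀ (stock : String), Dom_get_stock_sub_indexes stock → Spec_get_stock_sub_indexes stock (get_stock_sub_indexes stock)

-- ===== LEMMAS AND PROOFS =====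

-- if v is not in the first block, the index search offsets the index in the rest by the block's length
theorem pvIndex_skip {v : String} (l t : List String) (hv : v ∉ l) :
    PySem.List.index? (l ++ t) v = (PySem.List.index? t v).map (· + l.length) := by
  induction l with
  | nil =>
      cases h : PySem.List.index? t v <;>
        simp only [List.nil_append, List.length_nil, h, Option.map_some, Option.map_none,
          Nat.add_zero]
  | cons x l ih =>
      have hx : x ≠ v := fun e => hv (e ▸ List.mem_cons_self)
      have hl : v ∉ l := fun e => hv (List.mem_cons_of_mem _ e)
      rw [List.cons_append, PySem.List.index?_cons_of_ne _ hx, ih hl]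
      cases PySem.List.index? t v with
      | none => simp
      | some k => simp; omega

-- if v is in the first block, the index search finds it there, at an index below the block's length
theorem pvIndex_hit {v : String} (l t : List String) (hv : v ∈ l) :
    ∃ k, PySem.List.index? (l ++ t) v = some k ∧ k < l.length := by
  rw [PySem.List.index?_append_of_mem t hv]
  have hs : (PySem.List.index? l v).isSome := (PySem.List.index?_isSome_iff _ _).2 hv
  obtain ⟨k, hk⟩ := Option.isSome_iff_exists.1 hs
  refine ⟨k, hk, ?_⟩
  obtain ⟨pre, suf, hl, hlen, _⟩ := (PySem.List.index?_eq_some_iff _ _ _).1 hk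
  subst hl; simp [← hlen]

-- names for the four concrete category segments
def pvF : List String := ["0005.HK", "0011.HK", "0388.HK", "0939.HK", "1299.HK", "1398.HK", "2318.HK", "2388.HK", "2628.HK", "3328.HK", "3988.HK"]
def pvU : List String := ["0002.HK", "0003.HK", "0006.HK", "0836.HK", "1038.HK"]
def pvP : List String := ["0012.HK", "0016.HK", "0017.HK", "0083.HK", "0101.HK", "0688.HK", "0823.HK", "1109.HK", "1113.HK", "1997.HK", "2007.HK"]
def pvC : List String := ["0001.HK", "0019.HK", "0027.HK", "0066.HK", "0151.HK", "0175.HK", "0267.HK", "0288.HK", "0386.HK", "0700.HK", "0762.HK", "0857.HK", "0883.HK", "0941.HK", "1044.HK", "1088.HK", "1093.HK", "1177.HK", "1928.HK", "2018.HK", "2313.HK", "2319.HK", "2382.HK"]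

theorem pvTickers_eq : pvTickers = pvF ++ (pvU ++ (pvP ++ pvC)) := rfl

theorem pvItems_eq : pvSubIndexCategory.items =
    [("Finance", pvF), ("Utilities", pvU), ("Properties", pvP), ("Commerce & Industry", pvC)] := by
  decide

-- ===== VERDICT =====
theorem get_stock_sub_indexes_spec : Claim_equal_get_stock_sub_indexes := by
  intro stock _
  unfold Spec_get_stock_sub_indexes get_stock_sub_indexes get_stock_sub_indexes_alt
  rw [pvItems_eq, pvTickers_eq]
  by_cases hf : stock ∈ pvF
  · obtain ⟨k, hk, hkl⟩ := pvIndex_hit pvF _ hf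
    rw [hk]
    have hk11 : k < 11 := by simpa [pvF] using hkl
    simp [pvLoopA, hf, pvFindCat, pvBoundaries, hk11]
  · rw [pvIndex_skip _ _ hf]
    by_cases hu : stock ∈ pvU
    · obtain ⟨k, hk, hkl⟩ := pvIndex_hit pvU _ hu
      rw [hk]
      have hk5 : k < 5 := by simpa [pvU] using hkl
      have h1 : ¬ (k + pvF.length < 11) := by simp [pvF]
      have h2 : k + pvF.length < 16 := by simp [pvF]; omega
      simp [pvLoopA, hf, hu, pvFindCat, pvBoundaries, h1, h2]
    · rw [pvIndex_skip _ _ hu]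
      by_cases hp : stock ∈ pvP
      · obtain ⟨k, hk, hkl⟩ := pvIndex_hit pvP _ hp
        rw [hk]
        have hk11 : k < 11 := by simpa [pvP] using hkl
        have h1 : ¬ (k + pvU.length + pvF.length < 11) := by simp [pvU, pvF]
        have h2 : ¬ (k + pvU.length + pvF.length < 16) := by simp [pvU, pvF]
        have h3 : k + pvU.length + pvF.length < 27 := by simp [pvU, pvF]; omega
        simp [pvLoopA, hf, hu, hp, pvFindCat, pvBoundaries, h1, h2, h3]
      · rw [pvIndex_skip _ _ hp]
        by_cases hc : stock ∈ pvC
        · obtain ⟨k, hk, hkl⟩ := pvIndex_hit pvC [] hc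
          rw [List.append_nil] at hk
          rw [hk]
          have hk23 : k < 23 := by simpa [pvC] using hkl
          have h1 : ¬ (k + pvP.length + pvU.length + pvF.length < 11) := by simp [pvP, pvU, pvF]
          have h2 : ¬ (k + pvP.length + pvU.length + pvF.length < 16) := by simp [pvP, pvU, pvF]
          have h3 : ¬ (k + pvP.length + pvU.length + pvF.length < 27) := by simp [pvP, pvU, pvF]
          have h4 : k + pvP.length + pvU.length + pvF.length < 50 := by simp [pvP, pvU, pvF]; omega
          simp [pvLoopA, hf, hu, hp, hc, pvFindCat, pvBoundaries, h1, h2, h3, h4]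
        · rw [(PySem.List.index?_eq_none_iff _ _).2 hc]
          simp [pvLoopA, hf, hu, hp, hc]
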